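-- pv_equiv track=rewrite | github.com/MoreiraLAB/ProLigResDB | SCRIPTS/functions_pdb_to_csv.py | equal_chains_results
-- ===== SOURCE A (Python) =====
-- def equal_chains_results(sequence, prot_chains):
--     equal_chains = []
--     num_chain=len(sequence)
--     is_equal = [False]*num_chain
--     if num_chain > 1:
--         for c in range(num_chain-1):
--             if not is_equal[c]:
--                 other =[]
--                 for k in range(c+1,num_chain):
--                     if (sequence[c] == sequence[k]) and (not is_equal[k]):
--                         other.append(prot_chains[k])
--                         is_equal[k] = True
--                         is_equal[c] = True
--                 if is_equal[c]:
--                     seqs_equals = [prot_chains[c]]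
--                     for i in other:
--                         seqs_equals.append(i)
--                     equal_chains.append(seqs_equals)
--
--     return equal_chains
-- ===== SOURCE B (Python) =====
-- def equal_chains_results(sequence, prot_chains):
--     groups = {}
--     for i, s in enumerate(sequence):
--         groups.setdefault(s, []).append(i)
--     return [[prot_chains[i] for i in idxs]
--             for idxs in groups.values() if len(idxs) > 1]
-- ===== Notes on version B (the rewrite author's own statement) =====
-- stated objective: faster
-- what changed: Replaces A's quadratic boolean-flag double scan with a single pass that groups indices by sequence in a dict and emits groups of size > 1 in first-occurrence order.
import Mathlib
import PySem

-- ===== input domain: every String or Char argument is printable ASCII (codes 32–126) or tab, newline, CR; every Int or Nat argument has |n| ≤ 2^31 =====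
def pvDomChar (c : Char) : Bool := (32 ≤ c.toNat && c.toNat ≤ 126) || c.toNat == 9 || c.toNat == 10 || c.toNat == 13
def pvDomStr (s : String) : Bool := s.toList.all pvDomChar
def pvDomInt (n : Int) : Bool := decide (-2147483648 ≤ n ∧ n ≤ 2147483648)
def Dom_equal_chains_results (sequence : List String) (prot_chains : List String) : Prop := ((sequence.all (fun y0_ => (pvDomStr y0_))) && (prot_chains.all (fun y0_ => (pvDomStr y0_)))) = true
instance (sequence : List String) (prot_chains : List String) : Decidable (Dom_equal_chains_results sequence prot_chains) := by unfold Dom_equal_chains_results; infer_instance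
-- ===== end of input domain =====

-- B groups the chains by sequence with one dict pass (O(n)) instead of A's quadratic flag-scan; same return value.
-- ===== PORT A =====
-- Literal transliteration of A. Indices into `sequence` are always in range, and Pre_ guarantees
-- every accessed index of `prot_chains` is in range, so pyGetD's default "" is never the result.
def equal_chains_results (sequence : List String) (prot_chains : List String) : List (List String) :=
  let num_chain : Nat := sequence.length
  -- equal_chains = [], is_equal = [False]*num_chain, the two pieces of folded state
  if 1 < num_chain then
    ((PySem.List.pyRange 0 ((num_chain : Int) - 1)).foldl
      (fun (st : List (List String) × List Bool) c =>
        if PySem.List.pyGetD st.2 c false = false then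
          -- other = [], and the inner loop over k
          let inner := (PySem.List.pyRange (c + 1) (num_chain : Int)).foldl
            (fun (st2 : List String × List Bool) k =>
              if (PySem.List.pyGetD sequence c "" == PySem.List.pyGetD sequence k "")
                  && !(PySem.List.pyGetD st2.2 k false) then
                (st2.1 ++ [PySem.List.pyGetD prot_chains k ""],
                 PySem.List.pySetD (PySem.List.pySetD st2.2 k true) c true)
              else st2)
            ([], st.2)
          if PySem.List.pyGetD inner.2 c false then
            -- seqs_equals = [prot_chains[c]] followed by the elements of other
            (st.1 ++ [PySem.List.pyGetD prot_chains c "" :: inner.1], inner.2)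
          else (st.1, inner.2)
        else st)
      ([], List.replicate num_chain false)).1
  else []

-- ===== PORT B =====
-- Transliteration of B: one dict pass grouping indices by sequence, then emit groups of size > 1.
def equal_chains_results_alt (sequence : List String) (prot_chains : List String) : List (List String) :=
  let groups := (PySem.List.enumerate sequence).foldl
    (fun (d : PySem.Dict String (List Int)) p => d.modify p.2 [] (fun l => l ++ [p.1]))
    PySem.Dict.empty
  (groups.values.filter (fun idxs => decide (1 < idxs.length))).map
    (fun idxs => idxs.map (fun i => PySem.List.pyGetD prot_chains i ""))

-- ===== PRECONDITION & SPEC =====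
-- Pre_ excludes exactly the inputs where Python A raises IndexError: some index of a duplicated
-- sequence entry is out of range for prot_chains (B raises there as well).  Both Lean ports
-- totalize that one out-of-range read with the same default "", so the equivalence proof below
-- happens to go through without using Pre_; Pre_ is still what delimits the Pythons' domain.
def Pre_equal_chains_results (sequence : List String) (prot_chains : List String) : Prop :=
  ∀ i ∈ List.range sequence.length,
    2 ≤ sequence.count (sequence.getD i "") → i < prot_chains.length
instance (sequence : List String) (prot_chains : List String) : Decidable (Pre_equal_chains_results sequence prot_chains) := by unfold Pre_equal_chains_results; infer_instance
def pvWitness_equal_chains_results : List String × List String := (["a", "b", "a"], ["X", "Y", "Z"])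
def Spec_equal_chains_results (sequence : List String) (prot_chains : List String) (out : List (List String)) : Prop := out = equal_chains_results_alt sequence prot_chains
instance (sequence : List String) (prot_chains : List String) (out : List (List String)) : Decidable (Spec_equal_chains_results sequence prot_chains out) := by unfold Spec_equal_chains_results; infer_instance

-- ===== CLAIM (what is proved, stated in full; the proofs are below) =====
def Claim_equal_equal_chains_results : Prop := ∀ (sequence : List String) (prot_chains : List String), Dom_equal_chains_results sequence prot_chains → Pre_equal_chains_results sequence prot_chains → Spec_equal_chains_results sequence prot_chains (equal_chains_results sequence prot_chains)

-- ===== LEMMAS AND PROOFS =====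

-- value at index i (indices used below are always < sequence.length)
def seqAt (sequence : List String) (i : Nat) : String := sequence.getD i ""

-- the (sorted) list of positions of value x in sequence
def occ (sequence : List String) (x : String) : List Nat :=
  (List.range sequence.length).filter (fun i => seqAt sequence i == x)

-- chains of all positions of x
def grp (sequence prot_chains : List String) (x : String) : List String :=
  (occ sequence x).map (fun i => prot_chains.getD i "")

-- the common reference value both ports compute
def refOut (sequence prot_chains : List String) : List (List String) :=
  ((PySem.Set.ofList sequence).filter (fun x => decide (1 < (occ sequence x).length))).map
    (grp sequence prot_chains)

-- A's is_equal list after the outer loop has processed c = 0 .. m-1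
def flags (sequence : List String) (m : Nat) : List Bool :=
  (List.range sequence.length).map
    (fun i => decide ((∃ j, j < m ∧ seqAt sequence j = seqAt sequence i) ∧
                      1 < (occ sequence (seqAt sequence i)).length))

-- A's equal_chains list after the outer loop has processed c = 0 .. m-1
def eout (sequence prot_chains : List String) (m : Nat) : List (List String) :=
  ((List.range m).filter
    (fun c => decide ((¬ ∃ j, j < c ∧ seqAt sequence j = seqAt sequence c) ∧
                      1 < (occ sequence (seqAt sequence c)).length))).map
    (fun c => grp sequence prot_chains (seqAt sequence c))

-- the list sequence is the range-indexed map of its entries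
theorem map_seqAt_range (sequence : List String) :
    (List.range sequence.length).map (seqAt sequence) = sequence := by
  apply List.ext_getElem (by simp)
  intro i h1 h2
  simp [seqAt, List.getD_eq_getElem?_getD, List.getElem?_eq_getElem h2]

theorem range_split (n a : Nat) (h : a ≤ n) :
    List.range n = List.range a ++ List.range' a (n - a) := by
  rw [List.range_eq_range']
  have h2 : n = a + (n - a) := by omega
  rw [h2, ← List.range'_append]
  simp [List.range_eq_range']

theorem pyRange_cast (a b : Nat) :
    PySem.List.pyRange (a : Int) (b : Int) 1 = (List.range' a (b - a)).map (fun k : Nat => (k : Int)) := by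
  rw [PySem.List.pyRange_of_pos _ _ (by norm_num)]
  rcases Nat.lt_or_ge a b with h | h
  · rw [if_pos (by exact_mod_cast h), List.range'_eq_map_range]
    have h1 : ((↑b - ↑a + 1 - 1) / 1 : Int).toNat = b - a := by omega
    rw [h1, List.map_map]
    apply List.map_congr_left; intro k _; simp
  · rw [if_neg (by omega)]
    have h0 : b - a = 0 := by omega
    simp [h0]

theorem mem_occ (sequence : List String) (x : String) (i : Nat) :
    i ∈ occ sequence x ↔ i < sequence.length ∧ seqAt sequence i = x := by
  simp [occ, List.mem_filter, List.mem_range]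

theorem nodup_occ (sequence : List String) (x : String) : (occ sequence x).Nodup :=
  (List.nodup_range).filter _

theorem dup_of_two (sequence : List String) (x : String) (i j : Nat)
    (hi : i ∈ occ sequence x) (hj : j ∈ occ sequence x) (hne : i ≠ j) :
    1 < (occ sequence x).length := by
  have hnd := nodup_occ sequence x
  rcases h : occ sequence x with _ | ⟨a, _ | ⟨b, t⟩⟩ <;> rw [h] at hi hj hnd <;> simp_all

theorem exists_other_occ (sequence : List String) (x : String) (i : Nat)
    (hi : i ∈ occ sequence x) (hd : 1 < (occ sequence x).length) :
    ∃ j ∈ occ sequence x, j ≠ i := by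
  have hnd := nodup_occ sequence x
  rcases hl : occ sequence x with _ | ⟨a, _ | ⟨b, t⟩⟩ <;> rw [hl] at hd hnd <;>
    simp_all
  rcases Decidable.eq_or_ne a i with rfl | hne
  · exact Or.inr (Or.inl (Ne.symm hnd.1.1))
  · exact Or.inl hne

-- ---- the inner loop of A ----
theorem inner_loop (sequence prot_chains : List String) (c : Nat) (hc : c < sequence.length)
    (ks : List Nat) (f : List Bool) (acc : List String)
    (hlen : f.length = sequence.length)
    (hks : ∀ k ∈ ks, c < k ∧ k < sequence.length)
    (hnd : ks.Nodup)
    (hfalse : ∀ k ∈ ks, seqAt sequence k = seqAt sequence c → f.getD k false = false) :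
    ∃ f',
      ks.foldl
        (fun (st2 : List String × List Bool) k =>
          if (seqAt sequence c == seqAt sequence k) && !(st2.2.getD k false) then
            (st2.1 ++ [prot_chains.getD k ""], (st2.2.set k true).set c true)
          else st2)
        (acc, f)
      = (acc ++ (ks.filter (fun k => seqAt sequence k == seqAt sequence c)).map
            (fun k => prot_chains.getD k ""), f')
      ∧ f'.length = sequence.length
      ∧ ∀ i, f'.getD i false =
          (f.getD i false ||
            decide ((i ∈ ks ∧ seqAt sequence i = seqAt sequence c) ∨
                    (i = c ∧ ∃ k ∈ ks, seqAt sequence k = seqAt sequence c))) := by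
  induction ks generalizing f acc with
  | nil =>
    refine ⟨f, by simp, hlen, ?_⟩
    intro i; simp
  | cons k t ih =>
    have hkc : c < k ∧ k < sequence.length := hks k (by simp)
    have hknd : k ∉ t := (List.nodup_cons.mp hnd).1
    by_cases hm : seqAt sequence k = seqAt sequence c
    · have hf0 : f.getD k false = false := hfalse k (by simp) hm
      have hcond : ((seqAt sequence c == seqAt sequence k) && !(f.getD k false)) = true := by
        rw [hm, hf0]; simp
      rw [List.foldl_cons]
      simp only [hcond, if_pos]
      have hf1len : ((f.set k true).set c true).length = sequence.length := by simp [hlen]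
      obtain ⟨f', hfold, hflen, hfpt⟩ := ih ((f.set k true).set c true) (acc ++ [prot_chains.getD k ""])
        hf1len (fun k' hk' => hks k' (by simp [hk'])) (List.nodup_cons.mp hnd).2
        (by
          intro k' hk' hmk'
          have h1 : k' ≠ c := by have := hks k' (by simp [hk']); omega
          have h2 : k' ≠ k := fun h => hknd (h ▸ hk')
          rw [List.getD_eq_getElem?_getD, List.getElem?_set_ne (Ne.symm h1),
              List.getElem?_set_ne (Ne.symm h2), ← List.getD_eq_getElem?_getD]
          exact hfalse k' (by simp [hk']) hmk')
      refine ⟨f', ?_, hflen, ?_⟩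
      · rw [hfold]
        have : List.filter (fun k' => seqAt sequence k' == seqAt sequence c) (k :: t)
            = k :: List.filter (fun k' => seqAt sequence k' == seqAt sequence c) t := by
          rw [List.filter_cons_of_pos (by simp [hm])]
        rw [this]
        simp
      · intro i
        rw [hfpt i]
        by_cases hic : i = c
        · have h1 : ((f.set k true).set c true).getD i false = true := by
            rw [hic]; simp [List.getD_eq_getElem?_getD, hlen, hc]
          rw [h1]
          have h2 : decide ((i ∈ k :: t ∧ seqAt sequence i = seqAt sequence c) ∨
              (i = c ∧ ∃ k' ∈ k :: t, seqAt sequence k' = seqAt sequence c)) = true := by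
            simp only [decide_eq_true_eq]
            exact Or.inr ⟨hic, k, by simp, hm⟩
          rw [h2]
          simp
        · by_cases hik : i = k
          · have h1 : ((f.set k true).set c true).getD i false = true := by
              rw [hik, List.getD_eq_getElem?_getD,
                  List.getElem?_set_ne (by omega : c ≠ k)]
              simp [hlen, hkc.2]
            rw [h1]
            have h2 : decide ((i ∈ k :: t ∧ seqAt sequence i = seqAt sequence c) ∨
                (i = c ∧ ∃ k' ∈ k :: t, seqAt sequence k' = seqAt sequence c)) = true := by
              simp only [decide_eq_true_eq]
              exact Or.inl ⟨by simp [hik], by rw [hik]; exact hm⟩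
            rw [h2]
            simp
          · have h1 : ((f.set k true).set c true).getD i false = f.getD i false := by
              rw [List.getD_eq_getElem?_getD, List.getElem?_set_ne (fun h => hic h.symm),
                  List.getElem?_set_ne (fun h => hik h.symm), ← List.getD_eq_getElem?_getD]
            rw [h1]
            congr 1
            apply decide_eq_decide.mpr
            constructor
            · rintro (⟨hmem, hx⟩ | ⟨rfl, _⟩)
              · exact Or.inl ⟨List.mem_cons_of_mem _ hmem, hx⟩
              · exact absurd rfl hic
            · rintro (⟨hmem, hx⟩ | ⟨rfl, _⟩)
              · rcases (by simpa using hmem : i = k ∨ i ∈ t) with rfl | h'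
                · exact absurd rfl hik
                · exact Or.inl ⟨h', hx⟩
              · exact absurd rfl hic
    · have hcond : ((seqAt sequence c == seqAt sequence k) && !(f.getD k false)) = false := by
        simp; intro h; exact absurd h.symm hm
      rw [List.foldl_cons]
      simp only [hcond, Bool.false_eq_true, if_false]
      obtain ⟨f', hfold, hflen, hfpt⟩ := ih f acc hlen
        (fun k' hk' => hks k' (by simp [hk'])) (List.nodup_cons.mp hnd).2
        (fun k' hk' => hfalse k' (by simp [hk']))
      refine ⟨f', ?_, hflen, ?_⟩
      · rw [hfold, List.filter_cons_of_neg (by simp; intro h; exact absurd h hm)]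
      · intro i
        rw [hfpt i]
        congr 1
        apply decide_eq_decide.mpr
        constructor
        · rintro (⟨hmem, hx⟩ | ⟨rfl, hex⟩)
          · exact Or.inl ⟨List.mem_cons_of_mem _ hmem, hx⟩
          · exact Or.inr ⟨rfl, by obtain ⟨k', hk', hx⟩ := hex; exact ⟨k', List.mem_cons_of_mem _ hk', hx⟩⟩
        · rintro (⟨hmem, hx⟩ | ⟨rfl, hex⟩)
          · rcases (by simpa using hmem : i = k ∨ i ∈ t) with rfl | hmem'
            · exact absurd hx hm
            · exact Or.inl ⟨hmem', hx⟩
          · obtain ⟨k', hk', hx⟩ := hex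
            rcases (by simpa using hk' : k' = k ∨ k' ∈ t) with rfl | hk''
            · exact absurd hx hm
            · exact Or.inr ⟨rfl, k', hk'', hx⟩

-- ---- the outer loop of A ----
theorem outer_loop (sequence prot_chains : List String) (m : Nat) (hm : m ≤ sequence.length) :
    (List.range m).foldl
      (fun (st : List (List String) × List Bool) c =>
        if st.2.getD c false = false then
          let inner := (List.range' (c + 1) (sequence.length - (c + 1))).foldl
            (fun (st2 : List String × List Bool) k =>
              if (seqAt sequence c == seqAt sequence k) && !(st2.2.getD k false) then
                (st2.1 ++ [prot_chains.getD k ""], (st2.2.set k true).set c true)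
              else st2)
            ([], st.2)
          if inner.2.getD c false then
            (st.1 ++ [prot_chains.getD c "" :: inner.1], inner.2)
          else (st.1, inner.2)
        else st)
      ([], List.replicate sequence.length false)
    = (eout sequence prot_chains m, flags sequence m) := by
  induction m with
  | zero =>
    simp [eout, flags]
  | succ m ih =>
    have hm' : m ≤ sequence.length := by omega
    have hmn : m < sequence.length := by omega
    rw [List.range_succ, List.foldl_append, ih hm', List.foldl_cons, List.foldl_nil]
    have hflen : (flags sequence m).length = sequence.length := by simp [flags]
    have hfm : (flags sequence m).getD m false
        = decide ((∃ j, j < m ∧ seqAt sequence j = seqAt sequence m) ∧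
                  1 < (occ sequence (seqAt sequence m)).length) := by
      unfold flags
      exact PySem.List.getD_map_range _ _ _ _ hmn
    by_cases hE : ∃ j, j < m ∧ seqAt sequence j = seqAt sequence m
    · -- already grouped: flag is set, the step does nothing
      obtain ⟨j, hj, hjx⟩ := hE
      have hdup : 1 < (occ sequence (seqAt sequence m)).length := by
        refine dup_of_two sequence _ j m ?_ ?_ (by omega)
        · exact (mem_occ _ _ _).mpr ⟨by omega, hjx⟩
        · exact (mem_occ _ _ _).mpr ⟨hmn, rfl⟩
      have hflag : (flags sequence m).getD m false = true := by
        rw [hfm]; simp only [decide_eq_true_eq]; exact ⟨⟨j, hj, hjx⟩, hdup⟩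
      rw [if_neg (by rw [hflag]; simp)]
      have he : eout sequence prot_chains (m + 1) = eout sequence prot_chains m := by
        unfold eout
        rw [List.range_succ, List.filter_append, List.filter_cons]
        rw [if_neg (by simp only [decide_eq_true_eq, not_and]; intro h; exact absurd ⟨j, hj, hjx⟩ h)]
        simp
      have hf : flags sequence (m + 1) = flags sequence m := by
        unfold flags
        apply List.map_congr_left
        intro i _
        apply decide_eq_decide.mpr
        constructor
        · rintro ⟨⟨j', hj', hx'⟩, hd⟩
          rcases Nat.lt_or_ge j' m with h' | h'
          · exact ⟨⟨j', h', hx'⟩, hd⟩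
          · have : j' = m := by omega
            subst this
            exact ⟨⟨j, hj, hjx.trans hx'⟩, hd⟩
        · rintro ⟨⟨j', hj', hx'⟩, hd⟩
          exact ⟨⟨j', by omega, hx'⟩, hd⟩
      rw [he, hf]
    · -- m is the first occurrence of its value
      have hflag : (flags sequence m).getD m false = false := by
        rw [hfm]; simp only [decide_eq_false_iff_not]; rintro ⟨h, _⟩; exact hE h
      rw [if_pos (by rw [hflag])]
      obtain ⟨f', hfold, hflen', hfpt⟩ := inner_loop sequence prot_chains m hmn
        (List.range' (m + 1) (sequence.length - (m + 1))) (flags sequence m) []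
        hflen
        (by intro k hk; rw [List.mem_range'_1] at hk; omega)
        (List.nodup_range')
        (by
          intro k hk hkx
          rw [List.mem_range'_1] at hk
          unfold flags
          rw [PySem.List.getD_map_range _ _ _ _ (by omega)]
          simp only [decide_eq_false_iff_not]
          rintro ⟨⟨j', hj', hx'⟩, _⟩
          exact hE ⟨j', hj', hx'.trans hkx⟩)
      simp only [hfold, List.nil_append]
      have hmem_ks : ∀ k, k ∈ List.range' (m + 1) (sequence.length - (m + 1)) ↔ (m + 1 ≤ k ∧ k < sequence.length) := by
        intro k; rw [List.mem_range'_1]; omega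
      by_cases hdup : 1 < (occ sequence (seqAt sequence m)).length
      · -- a duplicate exists: a group is emitted at m
        obtain ⟨j, hjo, hjm⟩ := exists_other_occ sequence _ m ((mem_occ _ _ _).mpr ⟨hmn, rfl⟩) hdup
        obtain ⟨hjn, hjx⟩ := (mem_occ _ _ _).mp hjo
        have hjgt : m < j := by
          rcases Nat.lt_or_ge j m with h' | h'
          · exact absurd ⟨j, h', hjx⟩ hE
          · omega
        have hjk : j ∈ List.range' (m + 1) (sequence.length - (m + 1)) := (hmem_ks j).mpr (by omega)
        have hocc : occ sequence (seqAt sequence m)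
            = m :: (List.range' (m + 1) (sequence.length - (m + 1))).filter
                (fun k => seqAt sequence k == seqAt sequence m) := by
          unfold occ
          rw [range_split sequence.length (m + 1) (by omega), List.filter_append,
              List.range_succ, List.filter_append, List.filter_cons]
          rw [if_pos (by simp)]
          have h0 : (List.range m).filter (fun i => seqAt sequence i == seqAt sequence m) = [] := by
            rw [List.filter_eq_nil_iff]
            intro j' hj'
            rw [List.mem_range] at hj'
            simp only [beq_iff_eq]
            intro hx'
            exact hE ⟨j', hj', hx'⟩
          rw [h0]
          simp
        have hcond : f'.getD m false = true := by
          rw [hfpt m, hflag]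
          simp only [Bool.false_or, decide_eq_true_eq]
          exact Or.inr ⟨trivial, j, hjk, hjx⟩
        rw [if_pos (by rw [hcond])]
        have he : eout sequence prot_chains (m + 1)
            = eout sequence prot_chains m
              ++ [prot_chains.getD m "" ::
                  ((List.range' (m + 1) (sequence.length - (m + 1))).filter
                    (fun k => seqAt sequence k == seqAt sequence m)).map (fun k => prot_chains.getD k "")] := by
          unfold eout
          rw [List.range_succ, List.filter_append, List.filter_cons]
          rw [if_pos (by simp only [decide_eq_true_eq]; exact ⟨hE, hdup⟩)]
          rw [List.filter_nil, List.map_append]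
          congr 1
          simp only [List.map_cons, List.map_nil]
          unfold grp
          rw [hocc]
          simp
        have hf : flags sequence (m + 1) = f' := by
          apply List.ext_getElem (by rw [hflen']; simp [flags])
          intro i h1 h2
          have hin : i < sequence.length := by simpa [flags] using h1
          have e1 : (flags sequence (m + 1))[i] = (flags sequence (m + 1)).getD i false :=
            (List.getD_eq_getElem _ _ h1).symm
          have e2 : f'[i] = f'.getD i false := (List.getD_eq_getElem _ _ h2).symm
          rw [e1, e2, hfpt i]
          unfold flags
          rw [PySem.List.getD_map_range _ _ _ _ hin, PySem.List.getD_map_range _ _ _ _ hin,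
          ← Bool.decide_or]
          apply decide_eq_decide.mpr
          constructor
          · rintro ⟨⟨j', hj', hx'⟩, hd⟩
            rcases Nat.lt_or_ge j' m with h' | h'
            · exact Or.inl ⟨⟨j', h', hx'⟩, hd⟩
            · have hjm' : j' = m := by omega
              subst hjm'
              rcases Nat.lt_trichotomy i j' with h'' | h'' | h''
              · exact absurd ⟨i, h'', hx'.symm⟩ hE
              · exact Or.inr (Or.inr ⟨h'', j, hjk, hjx⟩)
              · exact Or.inr (Or.inl ⟨(hmem_ks i).mpr (by omega), hx'.symm⟩)
          · rintro (⟨⟨j', hj', hx'⟩, hd⟩ | ⟨hmem, hx⟩ | ⟨rfl, _⟩)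
            · exact ⟨⟨j', by omega, hx'⟩, hd⟩
            · exact ⟨⟨m, by omega, hx.symm⟩, hx.symm ▸ hdup⟩
            · exact ⟨⟨i, by omega, rfl⟩, hdup⟩
        rw [he, hf]
      · -- no duplicate: nothing is emitted and no flag changes
        have hnone : ¬ ∃ k ∈ List.range' (m + 1) (sequence.length - (m + 1)), seqAt sequence k = seqAt sequence m := by
          rintro ⟨k, hk, hkx⟩
          rw [hmem_ks] at hk
          refine hdup (dup_of_two sequence _ k m ?_ ?_ (by omega))
          · exact (mem_occ _ _ _).mpr ⟨by omega, hkx⟩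
          · exact (mem_occ _ _ _).mpr ⟨hmn, rfl⟩
        have hcond : f'.getD m false = false := by
          rw [hfpt m, hflag]
          simp only [Bool.false_or, decide_eq_false_iff_not]
          rintro (⟨hmem, _⟩ | ⟨_, hex⟩)
          · rw [hmem_ks] at hmem; omega
          · exact hnone hex
        rw [if_neg (by rw [hcond]; simp)]
        have he : eout sequence prot_chains (m + 1) = eout sequence prot_chains m := by
          unfold eout
          rw [List.range_succ, List.filter_append, List.filter_cons]
          rw [if_neg (by simp only [decide_eq_true_eq]; rintro ⟨_, hd⟩; exact hdup hd)]
          simp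
        have hf : flags sequence (m + 1) = f' := by
          apply List.ext_getElem (by rw [hflen']; simp [flags])
          intro i h1 h2
          have hin : i < sequence.length := by simpa [flags] using h1
          have e1 : (flags sequence (m + 1))[i] = (flags sequence (m + 1)).getD i false :=
            (List.getD_eq_getElem _ _ h1).symm
          have e2 : f'[i] = f'.getD i false := (List.getD_eq_getElem _ _ h2).symm
          rw [e1, e2, hfpt i]
          unfold flags
          rw [PySem.List.getD_map_range _ _ _ _ hin, PySem.List.getD_map_range _ _ _ _ hin,
          ← Bool.decide_or]
          apply decide_eq_decide.mpr
          constructor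
          · rintro ⟨⟨j', hj', hx'⟩, hd⟩
            rcases Nat.lt_or_ge j' m with h' | h'
            · exact Or.inl ⟨⟨j', h', hx'⟩, hd⟩
            · have hjm' : j' = m := by omega
              subst hjm'
              rw [← hx'] at hd
              exact absurd hd hdup
          · rintro (⟨⟨j', hj', hx'⟩, hd⟩ | ⟨hmem, hx⟩ | ⟨rfl, hex⟩)
            · exact ⟨⟨j', by omega, hx'⟩, hd⟩
            · exact absurd ⟨i, hmem, hx⟩ hnone
            · exact absurd hex hnone
        rw [he, hf]

-- the values of sequence whose first occurrence is at their own index, in index order,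
-- are exactly the distinct values of sequence in first-occurrence order
theorem firsts_map_eq (l : List String) :
    ((List.range l.length).filter
      (fun c => decide (¬ ∃ j, j < c ∧ l.getD j "" = l.getD c ""))).map (fun c => l.getD c "")
    = PySem.Set.ofList l := by
  induction l using List.reverseRecOn with
  | nil => simp [PySem.Set.ofList]
  | append_singleton l x ih =>
    rw [List.length_append, List.length_cons, List.length_nil, Nat.zero_add, List.range_succ,
        List.filter_append, List.map_append]
    have hpred : ∀ c ∈ List.range l.length,
        (decide (¬ ∃ j, j < c ∧ (l ++ [x]).getD j "" = (l ++ [x]).getD c "")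
          = decide (¬ ∃ j, j < c ∧ l.getD j "" = l.getD c "")) := by
      intro c hc
      rw [List.mem_range] at hc
      apply decide_eq_decide.mpr
      constructor
      · intro h ⟨j, hj, hx⟩
        exact h ⟨j, hj, by rw [List.getD_append _ _ _ _ (by omega), List.getD_append _ _ _ _ hc]; exact hx⟩
      · intro h ⟨j, hj, hx⟩
        rw [List.getD_append _ _ _ _ (by omega), List.getD_append _ _ _ _ hc] at hx
        exact h ⟨j, hj, hx⟩
    rw [List.filter_congr hpred]
    have hmap : ((List.range l.length).filter
          (fun c => decide (¬ ∃ j, j < c ∧ l.getD j "" = l.getD c ""))).map (fun c => (l ++ [x]).getD c "")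
        = ((List.range l.length).filter
          (fun c => decide (¬ ∃ j, j < c ∧ l.getD j "" = l.getD c ""))).map (fun c => l.getD c "") := by
      apply List.map_congr_left
      intro c hc
      have : c < l.length := List.mem_range.mp (List.mem_filter.mp hc).1
      exact List.getD_append _ _ _ _ this
    rw [hmap, ih, PySem.Set.ofList_append_singleton]
    have hxlen : (l ++ [x]).getD l.length "" = x := by
      simp [List.getD]
    have hmemiff : (∃ j, j < l.length ∧ (l ++ [x]).getD j "" = (l ++ [x]).getD l.length "") ↔ x ∈ l := by
      rw [hxlen]
      constructor
      · rintro ⟨j, hj, hx⟩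
        rw [List.getD_append _ _ _ _ hj, List.getD_eq_getElem _ _ hj] at hx
        exact hx ▸ List.getElem_mem hj
      · intro hx
        obtain ⟨j, hj, he⟩ := List.mem_iff_getElem.mp hx
        exact ⟨j, hj, by rw [List.getD_append _ _ _ _ hj, List.getD_eq_getElem _ _ hj]; exact he⟩
    by_cases hx : x ∈ l
    · rw [List.filter_cons, if_neg (by simp only [decide_not]; simp only [Bool.not_eq_true', decide_eq_false_iff_not, not_not]; exact hmemiff.mpr hx)]
      rw [PySem.Set.add_of_mem (by rw [PySem.Set.mem_ofList]; exact hx)]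
      simp
    · rw [List.filter_cons, if_pos (by simp only [decide_eq_true_eq]; rw [hmemiff]; exact hx)]
      rw [PySem.Set.add_of_not_mem (by rw [PySem.Set.mem_ofList]; exact hx)]
      simp

-- eout at the last processed index equals eout over the whole range
theorem eout_last (sequence prot_chains : List String) (h1 : 1 ≤ sequence.length) :
    eout sequence prot_chains (sequence.length - 1) = eout sequence prot_chains sequence.length := by
  unfold eout
  have hn : sequence.length = (sequence.length - 1) + 1 := by omega
  conv_rhs => rw [hn, List.range_succ]
  rw [List.filter_append, List.filter_cons]
  rw [if_neg ?hneg]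
  · simp
  case hneg =>
    simp only [decide_eq_true_eq, not_and]
    intro hfirst hdup
    obtain ⟨j, hjo, hjm⟩ := exists_other_occ sequence _ (sequence.length - 1)
      ((mem_occ _ _ _).mpr ⟨by omega, rfl⟩) hdup
    obtain ⟨hjn, hjx⟩ := (mem_occ _ _ _).mp hjo
    exact hfirst ⟨j, by omega, hjx⟩

-- eout over the whole range equals the reference value
theorem eout_eq_ref (sequence prot_chains : List String) :
    eout sequence prot_chains sequence.length = refOut sequence prot_chains := by
  unfold eout refOut
  have hsplit : (List.range sequence.length).filter
      (fun c => decide ((¬ ∃ j, j < c ∧ seqAt sequence j = seqAt sequence c) ∧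
                        1 < (occ sequence (seqAt sequence c)).length))
      = ((List.range sequence.length).filter
          (fun c => decide (¬ ∃ j, j < c ∧ seqAt sequence j = seqAt sequence c))).filter
          (fun c => decide (1 < (occ sequence (seqAt sequence c)).length)) := by
    rw [List.filter_filter]
    apply List.filter_congr
    intro c _
    rw [Bool.decide_and, Bool.and_comm]
  rw [hsplit]
  have hcomp : (fun c => decide (1 < (occ sequence (seqAt sequence c)).length))
      = (fun x => decide (1 < (occ sequence x).length)) ∘ seqAt sequence := rfl
  have hcomp2 : (fun c => grp sequence prot_chains (seqAt sequence c))
      = grp sequence prot_chains ∘ seqAt sequence := rfl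
  rw [hcomp, hcomp2, ← List.map_map, ← List.filter_map]
  have : (List.map (seqAt sequence) ((List.range sequence.length).filter
      (fun c => decide (¬ ∃ j, j < c ∧ seqAt sequence j = seqAt sequence c))))
      = PySem.Set.ofList sequence := firsts_map_eq sequence
  rw [this]

-- A's port equals the reference value
theorem portA_eq_ref (sequence prot_chains : List String) :
    equal_chains_results sequence prot_chains = refOut sequence prot_chains := by
  unfold equal_chains_results
  by_cases hn : 1 < sequence.length
  · rw [if_pos hn]
    have hc1 : ((sequence.length : Int) - 1) = ((sequence.length - 1 : Nat) : Int) := by omega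
    rw [hc1, PySem.List.pyRange_zero_natCast, List.foldl_map]
    have hbody : ∀ (st : List (List String) × List Bool) (c : Nat),
        (if PySem.List.pyGetD st.2 (c : Int) false = false then
          let inner := (PySem.List.pyRange ((c : Int) + 1) (sequence.length : Int)).foldl
            (fun (st2 : List String × List Bool) k =>
              if (PySem.List.pyGetD sequence (c : Int) "" == PySem.List.pyGetD sequence k "")
                  && !(PySem.List.pyGetD st2.2 k false) then
                (st2.1 ++ [PySem.List.pyGetD prot_chains k ""],
                 PySem.List.pySetD (PySem.List.pySetD st2.2 k true) (c : Int) true)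
              else st2)
            ([], st.2)
          if PySem.List.pyGetD inner.2 (c : Int) false then
            (st.1 ++ [PySem.List.pyGetD prot_chains (c : Int) "" :: inner.1], inner.2)
          else (st.1, inner.2)
        else st)
        = (if st.2.getD c false = false then
          let inner := (List.range' (c + 1) (sequence.length - (c + 1))).foldl
            (fun (st2 : List String × List Bool) k =>
              if (seqAt sequence c == seqAt sequence k) && !(st2.2.getD k false) then
                (st2.1 ++ [prot_chains.getD k ""], (st2.2.set k true).set c true)
              else st2)
            ([], st.2)
          if inner.2.getD c false then
            (st.1 ++ [prot_chains.getD c "" :: inner.1], inner.2)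
          else (st.1, inner.2)
        else st) := by
      intro st c
      have hr : PySem.List.pyRange ((c : Int) + 1) (sequence.length : Int) 1
          = (List.range' (c + 1) (sequence.length - (c + 1))).map (fun k : Nat => (k : Int)) := by
        have : ((c : Int) + 1) = (((c + 1 : Nat)) : Int) := by omega
        rw [this, pyRange_cast]
      rw [hr, List.foldl_map]
      have hib : (fun (st2 : List String × List Bool) (k : Nat) =>
            if (PySem.List.pyGetD sequence (c : Int) "" == PySem.List.pyGetD sequence (k : Int) "")
                && !(PySem.List.pyGetD st2.2 (k : Int) false) then
              (st2.1 ++ [PySem.List.pyGetD prot_chains (k : Int) ""],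
               PySem.List.pySetD (PySem.List.pySetD st2.2 (k : Int) true) (c : Int) true)
            else st2)
          = (fun (st2 : List String × List Bool) (k : Nat) =>
            if (seqAt sequence c == seqAt sequence k) && !(st2.2.getD k false) then
              (st2.1 ++ [prot_chains.getD k ""], (st2.2.set k true).set c true)
            else st2) := by
        funext st2 k
        rw [PySem.List.pyGetD_natCast, PySem.List.pyGetD_natCast, PySem.List.pyGetD_natCast,
            PySem.List.pyGetD_natCast,
            PySem.List.pySetD_of_nonneg _ _ (by omega), PySem.List.pySetD_of_nonneg _ _ (by omega)]
        simp [seqAt]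
      rw [hib]
      simp only [PySem.List.pyGetD_natCast]
    simp only [hbody]
    rw [outer_loop sequence prot_chains (sequence.length - 1) (by omega)]
    rw [eout_last sequence prot_chains (by omega), eout_eq_ref]
  · rw [if_neg hn]
    unfold refOut
    have : (PySem.Set.ofList sequence).filter (fun x => decide (1 < (occ sequence x).length)) = [] := by
      rw [List.filter_eq_nil_iff]
      intro x _
      simp only [decide_eq_true_eq, not_lt]
      calc (occ sequence x).length ≤ (List.range sequence.length).length := List.length_filter_le _ _
        _ ≤ 1 := by simp; omega
    rw [this, List.map_nil]

-- B's port equals the reference value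
theorem portB_eq_ref (sequence prot_chains : List String) :
    equal_chains_results_alt sequence prot_chains = refOut sequence prot_chains := by
  unfold equal_chains_results_alt
  rw [PySem.List.enumerate_eq_map_pyRange sequence "", List.foldl_map,
      PySem.List.len_eq, PySem.List.pyRange_zero_natCast, List.foldl_map]
  have hbody : (fun (d : PySem.Dict String (List Int)) (k : Nat) =>
        d.modify (PySem.List.pyGetD sequence (k : Int) "") [] (fun l => l ++ [((k : Int), PySem.List.pyGetD sequence (k : Int) "").1]))
      = (fun d k => d.modify (seqAt sequence k) [] (fun l => l ++ [(k : Int)])) := by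
    funext d k
    simp [PySem.List.pyGetD_natCast, seqAt]
  set n := sequence.length with hn
  have hfold : (List.range n).foldl
      (fun (d : PySem.Dict String (List Int)) (k : Nat) => d.modify (seqAt sequence k) [] (fun l => l ++ [(k : Int)])) PySem.Dict.empty
      = ((List.range n).map (fun i => (seqAt sequence i, (i : Int)))).foldl
          (fun d p => d.modify p.1 [] (fun l => l ++ [p.2])) PySem.Dict.empty := by
    rw [List.foldl_map]
  have hkeys : (((List.range n).map (fun i => (seqAt sequence i, (i : Int)))).foldl
      (fun d p => d.modify p.1 [] (fun l => l ++ [p.2])) PySem.Dict.empty).keys = PySem.Set.ofList sequence := by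
    rw [PySem.Dict.keys_foldl_modify_key ((List.range n).map (fun i => (seqAt sequence i, (i : Int)))) (fun p : String × Int => p.1) [] (fun _ (p : String × Int) (v : List Int) => v ++ [p.2])]
    rw [PySem.Dict.keys_empty, PySem.Set.update_nil_left, List.map_map]
    have : ((fun p : String × Int => p.1) ∘ fun i => (seqAt sequence i, (i : Int))) = seqAt sequence := rfl
    rw [this, map_seqAt_range]
  have hnd : (((List.range n).map (fun i => (seqAt sequence i, (i : Int)))).foldl
      (fun d p => d.modify p.1 [] (fun l => l ++ [p.2])) PySem.Dict.empty).keys.Nodup := by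
    exact PySem.Dict.nodup_keys_foldl_modify_key ((List.range n).map (fun i => (seqAt sequence i, (i : Int)))) (fun p : String × Int => p.1) [] (fun _ (p : String × Int) (v : List Int) => v ++ [p.2]) _ PySem.Dict.nodup_keys_empty
  have hgetD : ∀ x, (((List.range n).map (fun i => (seqAt sequence i, (i : Int)))).foldl
      (fun d p => d.modify p.1 [] (fun l => l ++ [p.2])) PySem.Dict.empty).getD x []
      = List.map (fun i : Nat => (i : Int)) (occ sequence x) := by
    intro x
    rw [PySem.Dict.getD_foldl_modify_append, PySem.Dict.getD_empty, List.filter_map,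
        List.map_map, List.nil_append]
    rfl
  simp only [hbody]
  rw [hfold, PySem.Dict.values_eq_map_keys _ hnd [], hkeys]
  have hmap : (PySem.Set.ofList sequence).map (fun k =>
      (((List.range n).map (fun i => (seqAt sequence i, (i : Int)))).foldl
      (fun d p => d.modify p.1 [] (fun l => l ++ [p.2])) PySem.Dict.empty).getD k [])
      = (PySem.Set.ofList sequence).map (fun x => List.map (fun i : Nat => (i : Int)) (occ sequence x)) := by
    apply List.map_congr_left; intro x _; exact hgetD x
  rw [hmap, List.filter_map, List.map_map]
  unfold refOut
  have hp : ((fun idxs : List Int => decide (1 < idxs.length)) ∘ fun x => List.map (fun i : Nat => (i : Int)) (occ sequence x))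
      = fun x => decide (1 < (occ sequence x).length) := by
    funext x; simp
  have hf : ((fun idxs : List Int => idxs.map (fun i => PySem.List.pyGetD prot_chains i "")) ∘ fun x => List.map (fun i : Nat => (i : Int)) (occ sequence x))
      = grp sequence prot_chains := by
    funext x
    simp only [Function.comp, List.map_map, grp]
    apply List.map_congr_left; intro i _
    simp [PySem.List.pyGetD_natCast]
  rw [hp, hf]

-- ===== VERDICT (by name: the statement is the Claim_ definition above) =====
theorem equal_chains_results_spec : Claim_equal_equal_chains_results := by
  intro sequence prot_chains _ _
  unfold Spec_equal_chains_results
  rw [portA_eq_ref sequence prot_chains, portB_eq_ref]
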